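-- pv_equiv track=rewrite | github.com/jiaeyan/yugioh-card-data | card.py | get_card_info
-- ===== SOURCE A (Python) =====
-- def get_card_info(code, checklist, info_type=None):
--     fil = 1
--     i = 0
--
--     upto = 1
--     if info_type == 'category':
--         upto = 0x100000000
--     elif info_type == 'type':
--         upto = 0x8000000
--     elif info_type == 'race':
--         upto = 0x2000000
--     elif info_type == 'attribute':
--         upto = 0x80
--
--     res = []
--     while fil != upto:
--         if code & fil:
--             res.append(checklist[i])
--         fil <<= 1
--         i += 1
--     return '|'.join(res)
-- ===== SOURCE B (Python) =====
-- _BOUNDS = {'category': 32, 'type': 27, 'race': 25, 'attribute': 7}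
--
--
-- def get_card_info(code, checklist, info_type=None):
--     bound = _BOUNDS.get(info_type, 0)
--     m = code & ((1 << bound) - 1)
--     res = []
--     while m:
--         low = m ^ (m - 1)          # ones through the lowest set bit of m
--         res.append(checklist[low.bit_length() - 1])
--         m &= m - 1                 # clear the lowest set bit
--     return '|'.join(res)
-- ===== Notes on version B (the rewrite author's own statement) =====
-- stated objective: alternative
-- what changed: Instead of scanning every bit position 0..bound-1 with a growing mask, B masks code to the bound's low bits once and then iterates only over the set bits, extracting each lowest set bit via m^(m-1)/bit_length and clearing it with m&=m-1.
import Mathlib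
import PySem

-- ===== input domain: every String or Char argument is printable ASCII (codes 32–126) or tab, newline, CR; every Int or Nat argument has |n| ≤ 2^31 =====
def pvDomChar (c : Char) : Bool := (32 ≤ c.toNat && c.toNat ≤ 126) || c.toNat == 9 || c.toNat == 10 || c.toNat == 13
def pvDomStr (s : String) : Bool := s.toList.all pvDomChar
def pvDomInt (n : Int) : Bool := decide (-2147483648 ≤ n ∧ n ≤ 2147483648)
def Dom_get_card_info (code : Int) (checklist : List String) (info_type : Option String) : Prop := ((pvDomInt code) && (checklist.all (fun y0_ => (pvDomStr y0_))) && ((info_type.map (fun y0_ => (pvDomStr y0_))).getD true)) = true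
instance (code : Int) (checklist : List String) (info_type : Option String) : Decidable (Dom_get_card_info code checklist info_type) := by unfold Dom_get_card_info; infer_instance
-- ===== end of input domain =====

-- B re-implements A's position-by-position scan as a loop over the set bits only
-- (mask once, then extract/clear the lowest set bit); same return value wherever A returns.

-- ===== PORT A =====
-- Python: the if/elif chain choosing `upto`
def pvAUpto (info_type : Option String) : Int :=
  if info_type == some "category" then 0x100000000
  else if info_type == some "type" then 0x8000000
  else if info_type == some "race" then 0x2000000
  else if info_type == some "attribute" then 0x80
  else 1

-- Python: `while fil != upto: …`.  On every state the loop reaches, fil = 2^i and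
-- upto = 2^bound with i ≤ bound, so `fil != upto` equals `0 < fil ∧ fil < upto`;
-- the latter form is used as the guard so the recursion is total (pure termination guard).
-- `checklist[i]` is pyGet? with .getD "" (Python raises IndexError there; Pre_ excludes those inputs).
def pvALoop (code : Int) (checklist : List String) (upto : Int) (fil : Int) (i : Nat) (res : List String) : List String :=
  if h : 0 < fil ∧ fil < upto then
    pvALoop code checklist upto (fil <<< (1:Nat)) (i + 1)
      (if PySem.Int.band code fil ≠ 0 then res ++ [(PySem.List.pyGet? checklist (i : Int)).getD ""] else res)
  else res
termination_by (upto.toNat - fil.toNat)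
decreasing_by
  have h2 : fil <<< (1:Nat) = 2 * fil := by rw [Int.shiftLeft_eq]; ring
  rw [h2]; omega

def get_card_info (code : Int) (checklist : List String) (info_type : Option String) : String :=
  let upto := pvAUpto info_type
  PySem.Str.join "|" (pvALoop code checklist upto 1 0 [])

-- ===== PORT B =====
-- Python: module-level dict _BOUNDS
def pvBTable : PySem.Dict String Nat :=
  PySem.Dict.ofList [("category", 32), ("type", 27), ("race", 25), ("attribute", 7)]

-- Python: _BOUNDS.get(info_type, 0); a None key matches no string key of the dict
def pvBBound (info_type : Option String) : Nat :=
  match info_type with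
  | some s => (PySem.Dict.get? pvBTable s).getD 0
  | none => 0

-- Python: `while m:` — m is always ≥ 0 here (code & ((1<<bound)-1) with a nonnegative mask),
-- so the truth test is `0 < m`.  `low.bit_length() - 1` is bitLength - 1 on Nat (low ≥ 1 whenever read).
-- `checklist[…]` is pyGet? with .getD "" (Python raises IndexError there; Pre_ excludes those inputs).
def pvBLoop (checklist : List String) (m : Int) (res : List String) : List String :=
  if h : 0 < m then
    let low := PySem.Int.bxor m (m - 1)
    pvBLoop checklist (PySem.Int.band m (m - 1))
      (res ++ [(PySem.List.pyGet? checklist ((PySem.Int.bitLength low - 1 : Nat) : Int)).getD ""])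
  else res
termination_by m.toNat
decreasing_by
  have h1 : PySem.Int.band m (m - 1) = ((m.toNat &&& ((m - 1).toNat) : Nat) : Int) :=
    PySem.Int.band_of_nonneg (le_of_lt h) (by omega)
  have h2 := Nat.and_le_right (n := m.toNat) (m := (m - 1).toNat)
  rw [h1]; omega

def get_card_info_alt (code : Int) (checklist : List String) (info_type : Option String) : String :=
  let bound := pvBBound info_type
  let m := PySem.Int.band code (((1 : Int) <<< bound) - 1)
  PySem.Str.join "|" (pvBLoop checklist m [])

-- ===== PRECONDITION & SPEC =====
-- Pre_ excludes exactly the inputs where Python A raises IndexError: some bit of code at a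
-- position below the info_type's bound is set but that position is not an index of checklist.
def pvPreBound (info_type : Option String) : Nat :=
  if info_type == some "category" then 32
  else if info_type == some "type" then 27
  else if info_type == some "race" then 25
  else if info_type == some "attribute" then 7
  else 0

def Pre_get_card_info (code : Int) (checklist : List String) (info_type : Option String) : Prop :=
  ∀ i : Nat, i < pvPreBound info_type → PySem.Int.band code ((2 : Int) ^ i) ≠ 0 → i < checklist.length
instance (code : Int) (checklist : List String) (info_type : Option String) : Decidable (Pre_get_card_info code checklist info_type) := by unfold Pre_get_card_info; infer_instance

def pvWitness_get_card_info : Int × List String × Option String := (5, ["a", "b", "c"], some "attribute")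

def Spec_get_card_info (code : Int) (checklist : List String) (info_type : Option String) (out : String) : Prop := out = get_card_info_alt code checklist info_type
instance (code : Int) (checklist : List String) (info_type : Option String) (out : String) : Decidable (Spec_get_card_info code checklist info_type out) := by unfold Spec_get_card_info; infer_instance

-- ===== CLAIM (what is proved, stated in full; the proofs are below) =====
def Claim_equal_get_card_info : Prop := ∀ (code : Int) (checklist : List String) (info_type : Option String), Dom_get_card_info code checklist info_type → Pre_get_card_info code checklist info_type → Spec_get_card_info code checklist info_type (get_card_info code checklist info_type)

-- ===== LEMMAS AND PROOFS =====

-- the string appended for bit position j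
def pvF (cl : List String) (j : Nat) : String := (PySem.List.pyGet? cl (j : Int)).getD ""

-- ascending list of set-bit positions of n
def sbits (n : Nat) : List Nat :=
  if n = 0 then [] else (if n % 2 = 1 then [0] else []) ++ (sbits (n / 2)).map (· + 1)
termination_by n
decreasing_by omega

-- index of the lowest set bit of n (0 for n = 0)
def lowbit (n : Nat) : Nat :=
  if n % 2 = 1 ∨ n = 0 then 0 else lowbit (n / 2) + 1
termination_by n
decreasing_by omega

theorem sbits_zero : sbits 0 = [] := by rw [sbits]; simp

theorem sbits_unfold (n : Nat) :
    sbits n = (if n % 2 = 1 then [0] else []) ++ (sbits (n / 2)).map (· + 1) := by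
  rw [sbits]
  by_cases h : n = 0
  · subst h; rw [sbits]; simp
  · simp [h]

theorem bit_true_eq (q : Nat) : Nat.bit true q = 2 * q + 1 := by simp [Nat.bit_val]
theorem bit_false_eq (q : Nat) : Nat.bit false q = 2 * q := by simp [Nat.bit_val]

theorem lowbit_odd {n : Nat} (h : n % 2 = 1) : lowbit n = 0 := by rw [lowbit]; simp [h]
theorem lowbit_even {n : Nat} (h : n % 2 = 0) (h0 : n ≠ 0) : lowbit n = lowbit (n / 2) + 1 := by
  rw [lowbit]; simp [h, h0]

theorem pow_lowbit_le {n : Nat} (h : 0 < n) : 2 ^ lowbit n ≤ n := by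
  induction n using Nat.strong_induction_on with
  | _ n ih =>
    rcases Nat.even_or_odd n with he | ho
    · have h2 : n % 2 = 0 := Nat.even_iff.mp he
      have h0 : n ≠ 0 := by omega
      have hq : 0 < n / 2 := by omega
      have := ih (n / 2) (by omega) hq
      rw [lowbit_even h2 h0, pow_succ]
      omega
    · rw [lowbit_odd (Nat.odd_iff.mp ho)]; omega

theorem and_pred_eq {n : Nat} (h : 0 < n) : n &&& (n - 1) = n - 2 ^ lowbit n := by
  induction n using Nat.strong_induction_on with
  | _ n ih =>
    rcases Nat.even_or_odd n with he | ho
    · have h2 : n % 2 = 0 := Nat.even_iff.mp he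
      have h0 : n ≠ 0 := by omega
      have hq : 0 < n / 2 := by omega
      have hn : n = Nat.bit false (n / 2) := by rw [bit_false_eq]; omega
      have hn1 : n - 1 = Nat.bit true (n / 2 - 1) := by rw [bit_true_eq]; omega
      have hih := ih (n / 2) (by omega) hq
      have hle := pow_lowbit_le hq
      calc n &&& (n - 1) = Nat.bit false (n / 2) &&& Nat.bit true (n / 2 - 1) := by rw [← hn, ← hn1]
        _ = Nat.bit false ((n / 2) &&& (n / 2 - 1)) := by rw [Nat.land_bit]; rfl
        _ = 2 * ((n / 2) &&& (n / 2 - 1)) := bit_false_eq _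
        _ = 2 * (n / 2 - 2 ^ lowbit (n / 2)) := by rw [hih]
        _ = n - 2 ^ lowbit n := by rw [lowbit_even h2 h0, pow_succ]; omega
    · have h2 : n % 2 = 1 := Nat.odd_iff.mp ho
      have hn : n = Nat.bit true (n / 2) := by rw [bit_true_eq]; omega
      have hn1 : n - 1 = Nat.bit false (n / 2) := by rw [bit_false_eq]; omega
      calc n &&& (n - 1) = Nat.bit true (n / 2) &&& Nat.bit false (n / 2) := by rw [← hn, ← hn1]
        _ = Nat.bit false ((n / 2) &&& (n / 2)) := by rw [Nat.land_bit]; rfl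
        _ = 2 * (n / 2) := by rw [Nat.and_self, bit_false_eq]
        _ = n - 2 ^ lowbit n := by rw [lowbit_odd h2]; omega

theorem xor_pred_eq {n : Nat} (h : 0 < n) : n ^^^ (n - 1) = 2 ^ (lowbit n + 1) - 1 := by
  induction n using Nat.strong_induction_on with
  | _ n ih =>
    rcases Nat.even_or_odd n with he | ho
    · have h2 : n % 2 = 0 := Nat.even_iff.mp he
      have h0 : n ≠ 0 := by omega
      have hq : 0 < n / 2 := by omega
      have hn : n = Nat.bit false (n / 2) := by rw [bit_false_eq]; omega
      have hn1 : n - 1 = Nat.bit true (n / 2 - 1) := by rw [bit_true_eq]; omega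
      have hih := ih (n / 2) (by omega) hq
      calc n ^^^ (n - 1) = Nat.bit false (n / 2) ^^^ Nat.bit true (n / 2 - 1) := by rw [← hn, ← hn1]
        _ = Nat.bit true ((n / 2) ^^^ (n / 2 - 1)) := by rw [Nat.xor_bit]; rfl
        _ = 2 * ((n / 2) ^^^ (n / 2 - 1)) + 1 := bit_true_eq _
        _ = 2 * (2 ^ (lowbit (n / 2) + 1) - 1) + 1 := by rw [hih]
        _ = 2 ^ (lowbit n + 1) - 1 := by
              rw [lowbit_even h2 h0]
              have : 0 < 2 ^ (lowbit (n / 2) + 1) := Nat.pow_pos (show 0 < 2 by omega)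
              rw [pow_succ 2 (lowbit (n / 2) + 1)]
              omega
    · have h2 : n % 2 = 1 := Nat.odd_iff.mp ho
      have hn : n = Nat.bit true (n / 2) := by rw [bit_true_eq]; omega
      have hn1 : n - 1 = Nat.bit false (n / 2) := by rw [bit_false_eq]; omega
      calc n ^^^ (n - 1) = Nat.bit true (n / 2) ^^^ Nat.bit false (n / 2) := by rw [← hn, ← hn1]
        _ = Nat.bit true ((n / 2) ^^^ (n / 2)) := by rw [Nat.xor_bit]; rfl
        _ = 1 := by rw [Nat.xor_self, bit_true_eq]
        _ = 2 ^ (lowbit n + 1) - 1 := by rw [lowbit_odd h2]; norm_num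

theorem ldiff_zero_left (c : Nat) : Nat.ldiff 0 c = 0 := by
  show Nat.bitwise _ 0 c = 0
  rw [Nat.bitwise_zero_left]
  simp

theorem ldiff_add_and (x : Nat) : ∀ c : Nat, Nat.ldiff x c + (x &&& c) = x := by
  induction x using Nat.strong_induction_on with
  | _ x ih =>
    intro c
    by_cases hx0 : x = 0
    · subst hx0; rw [ldiff_zero_left]; simp
    · have hih := ih (x / 2) (by omega) (c / 2)
      rcases Nat.mod_two_eq_zero_or_one x with hx | hx <;>
        rcases Nat.mod_two_eq_zero_or_one c with hc | hc
      · have hxb : x = Nat.bit false (x / 2) := by rw [bit_false_eq]; omega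
        have hcb : c = Nat.bit false (c / 2) := by rw [bit_false_eq]; omega
        rw [hxb, hcb, Nat.ldiff_bit, Nat.land_bit]
        simp only [Bool.false_and, Bool.true_and, Bool.not_false, Bool.not_true,
          bit_false_eq, bit_true_eq]
        omega
      · have hxb : x = Nat.bit false (x / 2) := by rw [bit_false_eq]; omega
        have hcb : c = Nat.bit true (c / 2) := by rw [bit_true_eq]; omega
        rw [hxb, hcb, Nat.ldiff_bit, Nat.land_bit]
        simp only [Bool.false_and, Bool.true_and, Bool.not_false, Bool.not_true,
          bit_false_eq, bit_true_eq]
        omega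
      · have hxb : x = Nat.bit true (x / 2) := by rw [bit_true_eq]; omega
        have hcb : c = Nat.bit false (c / 2) := by rw [bit_false_eq]; omega
        rw [hxb, hcb, Nat.ldiff_bit, Nat.land_bit]
        simp only [Bool.false_and, Bool.true_and, Bool.not_false, Bool.not_true,
          Bool.and_false, Bool.and_true, bit_false_eq, bit_true_eq]
        omega
      · have hxb : x = Nat.bit true (x / 2) := by rw [bit_true_eq]; omega
        have hcb : c = Nat.bit true (c / 2) := by rw [bit_true_eq]; omega
        rw [hxb, hcb, Nat.ldiff_bit, Nat.land_bit]
        simp only [Bool.false_and, Bool.true_and, Bool.not_false, Bool.not_true,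
          Bool.and_false, Bool.and_true, bit_false_eq, bit_true_eq]
        omega

theorem sbits_even (q : Nat) : sbits (2 * q) = (sbits q).map (· + 1) := by
  rw [sbits_unfold]
  have h1 : 2 * q % 2 = 0 := by omega
  have h2 : 2 * q / 2 = q := by omega
  rw [h1, h2]; simp

theorem sbits_cons {n : Nat} (h : 0 < n) :
    sbits n = lowbit n :: sbits (n - 2 ^ lowbit n) := by
  induction n using Nat.strong_induction_on with
  | _ n ih =>
    rcases Nat.even_or_odd n with he | ho
    · have h2 : n % 2 = 0 := Nat.even_iff.mp he
      have h0 : n ≠ 0 := by omega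
      have hq : 0 < n / 2 := by omega
      have hle := pow_lowbit_le hq
      have hih := ih (n / 2) (by omega) hq
      have hn : n = 2 * (n / 2) := by omega
      calc sbits n = (sbits (n / 2)).map (· + 1) := by rw [hn, sbits_even, ← hn]
        _ = (lowbit (n / 2) :: sbits (n / 2 - 2 ^ lowbit (n / 2))).map (· + 1) := by rw [hih]
        _ = (lowbit (n / 2) + 1) :: (sbits (n / 2 - 2 ^ lowbit (n / 2))).map (· + 1) := by simp
        _ = lowbit n :: sbits (n - 2 ^ lowbit n) := by
              rw [lowbit_even h2 h0, ← sbits_even]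
              have : 2 * (n / 2 - 2 ^ lowbit (n / 2)) = n - 2 ^ (lowbit (n / 2) + 1) := by
                rw [pow_succ]; omega
              rw [this]
    · have h2 : n % 2 = 1 := Nat.odd_iff.mp ho
      have hodd : (if n % 2 = 1 then ([0] : List Nat) else []) = [0] := by rw [if_pos h2]
      rw [sbits_unfold, hodd, lowbit_odd h2]
      have h1 : n - 2 ^ (0:Nat) = 2 * (n / 2) := by omega
      rw [h1, sbits_even]
      simp

theorem bitLen_pow_sub_one (s : Nat) :
    PySem.Int.bitLength (((2 ^ (s + 1) - 1 : Nat) : Int)) = s + 1 := by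
  induction s with
  | zero =>
    have h1 : ((2 ^ (0 + 1) - 1 : Nat) : Int) = 1 := by norm_num
    rw [h1]; decide
  | succ s ih =>
    have hpos : 0 < 2 ^ (s + 2) - 1 := by
      have : (4:Nat) ≤ 2 ^ (s + 2) := by
        calc (4:Nat) = 2 ^ 2 := by norm_num
          _ ≤ 2 ^ (s + 2) := Nat.pow_le_pow_right (by omega) (by omega)
      omega
    rw [PySem.Int.bitLength_natCast hpos]
    have hdiv : (2 ^ (s + 2) - 1) / 2 = 2 ^ (s + 1) - 1 := by
      have : 2 ^ (s + 2) = 2 * 2 ^ (s + 1) := by rw [pow_succ]; ring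
      omega
    rw [hdiv, ih]

theorem pvBLoop_eq (cl : List String) : ∀ (n : Nat) (res : List String),
    pvBLoop cl ((n : Nat) : Int) res = res ++ (sbits n).map (pvF cl) := by
  intro n
  induction n using Nat.strong_induction_on with
  | _ n ih =>
    intro res
    by_cases h0 : n = 0
    · subst h0
      rw [pvBLoop]
      rw [dif_neg (by norm_num)]
      rw [sbits_zero]
      simp
    · have hn : 0 < n := by omega
      have hpos : (0:Int) < (n : Int) := by exact_mod_cast hn
      have hcast : ((n : Int) - 1) = ((n - 1 : Nat) : Int) := by omega
      have hxor : PySem.Int.bxor (n : Int) ((n : Int) - 1) = ((n ^^^ (n - 1) : Nat) : Int) := by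
        rw [hcast, PySem.Int.bxor_natCast]
      have hband : PySem.Int.band (n : Int) ((n : Int) - 1) = ((n &&& (n - 1) : Nat) : Int) := by
        rw [hcast, PySem.Int.band_natCast]
      have hle := pow_lowbit_le hn
      have hbl : PySem.Int.bitLength (PySem.Int.bxor (n : Int) ((n : Int) - 1)) - 1 = lowbit n := by
        rw [hxor, xor_pred_eq hn, bitLen_pow_sub_one]
        omega
      rw [pvBLoop]
      rw [dif_pos hpos]
      show pvBLoop cl (PySem.Int.band (↑n) (↑n - 1))
          (res ++ [(PySem.List.pyGet? cl ↑(PySem.Int.bitLength (PySem.Int.bxor (↑n) (↑n - 1)) - 1)).getD ""])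
        = res ++ List.map (pvF cl) (sbits n)
      rw [hbl, hband, and_pred_eq hn]
      have hlt : n - 2 ^ lowbit n < n := by
        have : 0 < 2 ^ lowbit n := Nat.pow_pos (show 0 < 2 by omega)
        omega
      rw [ih (n - 2 ^ lowbit n) hlt]
      rw [sbits_cons hn]
      simp [pvF]

theorem pvALoop_eq (code : Int) (cl : List String) : ∀ (k i : Nat) (n : Nat) (res : List String),
    (∀ j, j < k → (PySem.Int.band code ((2 : Int) ^ (i + j)) ≠ 0 ↔ n.testBit j)) → n < 2 ^ k →
    pvALoop code cl ((2 : Int) ^ (i + k)) ((2 : Int) ^ i) i res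
      = res ++ (sbits n).map (fun j => pvF cl (i + j)) := by
  intro k
  induction k with
  | zero =>
    intro i n res _ hlt
    have hn0 : n = 0 := by omega
    subst hn0
    rw [pvALoop]
    rw [dif_neg (by simp), sbits_zero]
    simp
  | succ k ih =>
    intro i n res hcond hlt
    have hguard : (0:Int) < (2:Int) ^ i ∧ (2:Int) ^ i < (2:Int) ^ (i + (k + 1)) :=
      ⟨pow_pos (by norm_num) i, pow_lt_pow_right₀ (by norm_num) (by omega)⟩
    rw [pvALoop]
    rw [dif_pos hguard]
    have hshift : ((2:Int) ^ i) <<< (1:Nat) = (2:Int) ^ (i + 1) := by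
      rw [Int.shiftLeft_eq]; ring
    have hupto : i + (k + 1) = (i + 1) + k := by omega
    have hcond' : ∀ j, j < k → (PySem.Int.band code ((2 : Int) ^ ((i + 1) + j)) ≠ 0 ↔ (n / 2).testBit j) := by
      intro j hj
      have := hcond (j + 1) (by omega)
      rw [show i + (j + 1) = (i + 1) + j by omega] at this
      rw [← Nat.testBit_succ]
      exact this
    have hlt' : n / 2 < 2 ^ k := by
      have : 2 ^ (k + 1) = 2 ^ k * 2 := by rw [pow_succ]
      omega
    rw [hshift, hupto, ih (i + 1) (n / 2) _ hcond' hlt']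
    have hc0 := hcond 0 (by omega)
    rw [add_zero] at hc0
    rw [sbits_unfold n]
    have hmap : ((sbits (n / 2)).map (· + 1)).map (fun j => pvF cl (i + j))
        = (sbits (n / 2)).map (fun j => pvF cl ((i + 1) + j)) := by
      rw [List.map_map]
      apply List.map_congr_left
      intro a _
      simp only [Function.comp]
      congr 1
      omega
    by_cases hb : n.testBit 0
    · have hm2 : n % 2 = 1 := by simpa [Nat.testBit_zero] using hb
      rw [if_pos (hc0.mpr hb), if_pos hm2]
      rw [List.map_append, hmap]
      simp [pvF]
    · have hm2 : ¬ (n % 2 = 1) := by simpa [Nat.testBit_zero] using hb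
      rw [if_neg (fun hne => hb (hc0.mp hne)), if_neg hm2]
      rw [List.nil_append, hmap]

theorem pvKey (code : Int) (b : Nat) :
    ∃ n : Nat, PySem.Int.band code (((1 : Int) <<< b) - 1) = (n : Int) ∧ n < 2 ^ b ∧
      ∀ j, j < b → (PySem.Int.band code ((2 : Int) ^ j) ≠ 0 ↔ n.testBit j) := by
  have hpow : ∀ t : Nat, ((2 ^ t : Nat) : Int) = (2 : Int) ^ t := by intro t; push_cast; ring
  have hone : (1:Nat) ≤ 2 ^ b := Nat.one_le_two_pow
  have hmask : ((1 : Int) <<< b) - 1 = ((2 ^ b - 1 : Nat) : Int) := by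
    rw [Int.shiftLeft_eq, one_mul, Nat.cast_sub hone, hpow]
    norm_num
  by_cases hc : 0 ≤ code
  · obtain ⟨c, rfl⟩ : ∃ c : Nat, code = (c : Int) := ⟨code.toNat, (Int.toNat_of_nonneg hc).symm⟩
    refine ⟨c &&& (2 ^ b - 1), ?_, ?_, ?_⟩
    · rw [hmask, PySem.Int.band_natCast]
    · have := Nat.and_le_right (n := c) (m := 2 ^ b - 1)
      omega
    · intro j hj
      rw [← hpow, PySem.Int.band_natCast]
      rw [Ne, Int.natCast_eq_zero]
      rw [Nat.and_two_pow]
      have htb : (c &&& (2 ^ b - 1)).testBit j = c.testBit j := by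
        rw [Nat.testBit_and, Nat.testBit_two_pow_sub_one, decide_eq_true hj, Bool.and_true]
      rw [htb]
      cases hcb : c.testBit j <;> simp [hcb]
  · set c : Nat := (-code - 1).toNat with hcdef
    have hbandneg : ∀ x : Nat, PySem.Int.band code ((x : Nat) : Int) = ((x - (x &&& c) : Nat) : Int) := by
      intro x
      unfold PySem.Int.band
      rw [if_neg (by omega), if_pos (Int.natCast_nonneg x)]
      rw [Int.toNat_natCast]
    have hsum := ldiff_add_and (2 ^ b - 1) c
    refine ⟨Nat.ldiff (2 ^ b - 1) c, ?_, ?_, ?_⟩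
    · rw [hmask, hbandneg]
      congr 1
      omega
    · omega
    · intro j hj
      rw [← hpow, hbandneg]
      rw [Ne, Int.natCast_eq_zero]
      rw [Nat.two_pow_and]
      rw [Nat.testBit_ldiff, Nat.testBit_two_pow_sub_one, decide_eq_true hj, Bool.true_and]
      cases hcb : c.testBit j <;> simp [hcb]

theorem pvBTable_eval :
    pvBTable = PySem.Dict.mk [("category", 32), ("type", 27), ("race", 25), ("attribute", 7)] := by
  rfl

theorem pvUpto_eq (it : Option String) : pvAUpto it = (2 : Int) ^ (pvBBound it) := by
  cases it with
  | none => simp [pvAUpto, pvBBound]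
  | some s =>
    by_cases h1 : s = "category"
    · subst h1; decide
    by_cases h2 : s = "type"
    · subst h2; decide
    by_cases h3 : s = "race"
    · subst h3; decide
    by_cases h4 : s = "attribute"
    · subst h4; decide
    simp [pvAUpto, pvBBound, pvBTable_eval, PySem.Dict.get?_mk_cons, h1, h2, h3, h4,
      Ne.symm h1, Ne.symm h2, Ne.symm h3, Ne.symm h4]
    norm_num [PySem.Dict.get?]

-- ===== VERDICT (by name: the statement is the Claim_ definition above) =====
theorem get_card_info_spec : Claim_equal_get_card_info := by
  unfold Claim_equal_get_card_info
  intro code cl it _ _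
  unfold Spec_get_card_info get_card_info get_card_info_alt
  obtain ⟨n, hm, hlt, hcond⟩ := pvKey code (pvBBound it)
  have hA : pvALoop code cl ((2 : Int) ^ (pvBBound it)) 1 0 [] = (sbits n).map (pvF cl) := by
    have h := pvALoop_eq code cl (pvBBound it) 0 n []
      (by intro j hj; simpa using hcond j hj) hlt
    rw [zero_add] at h
    rw [show ((2:Int) ^ (0:Nat)) = 1 by norm_num] at h
    rw [h]
    simp
  have hB : pvBLoop cl (PySem.Int.band code (((1 : Int) <<< pvBBound it) - 1)) []
      = (sbits n).map (pvF cl) := by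
    rw [hm, pvBLoop_eq]
    simp
  show PySem.Str.join "|" (pvALoop code cl (pvAUpto it) 1 0 [])
    = PySem.Str.join "|" (pvBLoop cl (PySem.Int.band code (((1 : Int) <<< pvBBound it) - 1)) [])
  rw [pvUpto_eq it, hA, hB]
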